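-- pv_equiv track=rewrite | github.com/sosacrazy126/Fabric | scripts/python_ui/components/pattern_list.py | _get_content_preview
-- ===== SOURCE A (Python) =====
-- def _get_content_preview(content: str) -> str:
--     """Get a preview of pattern content."""
--     # Extract first meaningful line that's not a header
--     lines = content.split('\n')
--     for line in lines:
--         line = line.strip()
--         if line and not line.startswith('#') and len(line) > 10:
--             # Truncate if too long
--             if len(line) > 100:
--                 return line[:97] + "..."
--             return line
--
--     # Fallback to first non-empty line
--     for line in lines:
--         line = line.strip()
--         if line:
--             if len(line) > 100:
--                 return line[:97] + "..."
--             return line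
--
--     return "No content preview available"
-- ===== SOURCE B (Python) =====
-- def _truncate(line: str) -> str:
--     return line[:97] + "..." if len(line) > 100 else line
--
--
-- def _get_content_preview(content: str) -> str:
--     """Get a preview of pattern content (single pass with fallback)."""
--     fallback = None
--     for line in content.split('\n'):
--         line = line.strip()
--         if not line:
--             continue
--         if fallback is None:
--             fallback = line
--         if not line.startswith('#') and len(line) > 10:
--             return _truncate(line)
--     if fallback is not None:
--         return _truncate(fallback)
--     return "No content preview available"
-- ===== Notes on version B (the rewrite author's own statement) =====
-- stated objective: simpler
-- what changed: Replaced A's two sequential scans over the split lines (one for a meaningful line, a second full rescan for the fallback) by a single pass that records the first non-empty stripped line as a fallback while scanning, with the truncation factored into a helper.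
import Mathlib
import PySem

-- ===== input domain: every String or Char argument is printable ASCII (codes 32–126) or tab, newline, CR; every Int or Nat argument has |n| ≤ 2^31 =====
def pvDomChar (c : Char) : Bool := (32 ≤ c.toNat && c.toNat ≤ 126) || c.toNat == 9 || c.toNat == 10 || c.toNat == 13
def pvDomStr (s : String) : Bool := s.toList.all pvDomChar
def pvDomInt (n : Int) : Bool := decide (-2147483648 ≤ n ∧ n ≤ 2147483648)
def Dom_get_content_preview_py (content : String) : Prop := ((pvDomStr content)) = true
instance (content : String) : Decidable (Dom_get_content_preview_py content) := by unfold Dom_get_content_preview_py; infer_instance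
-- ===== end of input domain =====

-- B replaces A's two sequential scans of the split lines by one single pass that keeps the first
-- non-empty stripped line as a fallback (objective: simpler decomposition; same return value).

-- ===== PORT A =====
-- A: two passes over content.split('\n'): first for a meaningful line, then a full rescan for the first non-empty fallback.
def pvLoop1A : List String → Option String
  | [] => none
  | l :: rest =>
      let s := PySem.Str.strip l
      if s ≠ "" ∧ ¬ PySem.Str.startswith s "#" ∧ PySem.Str.len s > 10 then
        some (if PySem.Str.len s > 100 then PySem.Str.slice s none (some 97) ++ "..." else s)
      else pvLoop1A rest

def pvLoop2A : List String → Option String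
  | [] => none
  | l :: rest =>
      let s := PySem.Str.strip l
      if s ≠ "" then
        some (if PySem.Str.len s > 100 then PySem.Str.slice s none (some 97) ++ "..." else s)
      else pvLoop2A rest

def get_content_preview_py (content : String) : String :=
  let lines := (PySem.Str.split? content "\n").getD []
  match pvLoop1A lines with
  | some r => r
  | none =>
    match pvLoop2A lines with
    | some r => r
    | none => "No content preview available"

-- ===== PORT B =====
def pvTruncB (line : String) : String :=
  if PySem.Str.len line > 100 then PySem.Str.slice line none (some 97) ++ "..." else line

def pvLoopB : List String → Option String → String
  | [], fb =>
      match fb with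
      | some l => pvTruncB l
      | none => "No content preview available"
  | l :: rest, fb =>
      let s := PySem.Str.strip l
      if s = "" then pvLoopB rest fb
      else
        let fb' := if fb = none then some s else fb
        if ¬ PySem.Str.startswith s "#" ∧ PySem.Str.len s > 10 then pvTruncB s
        else pvLoopB rest fb'

def get_content_preview_py_alt (content : String) : String :=
  pvLoopB ((PySem.Str.split? content "\n").getD []) none

-- ===== PRECONDITION & SPEC =====
def Spec_get_content_preview_py (content : String) (out : String) : Prop := out = get_content_preview_py_alt content
instance (content : String) (out : String) : Decidable (Spec_get_content_preview_py content out) := by unfold Spec_get_content_preview_py; infer_instance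

-- ===== CLAIM (what is proved, stated in full; the proofs are below) =====
def Claim_equal_get_content_preview_py : Prop := ∀ (content : String), Dom_get_content_preview_py content → Spec_get_content_preview_py content (get_content_preview_py content)

-- ===== LEMMAS AND PROOFS =====
-- Invariant of B's single pass: with fallback fb it returns the first meaningful result if any,
-- else the truncated fb if set, else A's second-pass result / sentinel.
theorem pvLoopB_eq (lines : List String) (fb : Option String) :
    pvLoopB lines fb =
      match pvLoop1A lines with
      | some r => r
      | none =>
        match fb with
        | some l => pvTruncB l
        | none =>
          match pvLoop2A lines with
          | some r => r
          | none => "No content preview available" := by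
  induction lines generalizing fb with
  | nil => cases fb <;> rfl
  | cons l rest ih =>
    by_cases hs : PySem.Str.strip l = ""
    · simp only [pvLoopB, pvLoop1A, pvLoop2A, hs]
      simpa using ih fb
    · by_cases hm : PySem.Chars.startswith (PySem.Chars.strip l.toList) ['#'] = false ∧
          10 < (PySem.Chars.strip l.toList).length
      · simp [pvLoopB, pvLoop1A, hs, hm, pvTruncB]
      · simp only [pvLoopB, pvLoop1A, pvLoop2A]
        cases fb with
        | some l0 => simpa [hs, hm, pvTruncB] using ih (some l0)
        | none => simpa [hs, hm, pvTruncB] using ih (some (PySem.Str.strip l))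

-- ===== VERDICT (by name: the statement is the Claim_ definition above) =====
theorem get_content_preview_py_spec : Claim_equal_get_content_preview_py := by
  intro content _
  unfold Spec_get_content_preview_py get_content_preview_py get_content_preview_py_alt
  rw [pvLoopB_eq]
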